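-- pv_equiv track=rewrite | github.com/mmeus/czerwiec2017 | zad2.py | reg
-- ===== SOURCE A (Python) =====
-- def reg(w):
--     if len(w) == 1:
--         return 1
--     elif len(w) % 2 == 1:
--         w = w[:(len(w)//2)] + 'A' + w[(len(w)//2 + 1):]
--     if w[::] == w[::-1]:
--         return reg(w[:(len(w)//2)]) + 1
--     else:
--         return 0
-- ===== SOURCE B (Python) =====
-- def reg(w):
--     count = 0
--     m = len(w)
--     while m != 1:
--         if all(w[i] == w[m - 1 - i] for i in range(m // 2)):
--             count += 1
--             m //= 2
--         else:
--             return count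
--     return count + 1
-- ===== Notes on version B (the rewrite author's own statement) =====
-- stated objective: alternative
-- what changed: Instead of A's recursion that rebuilds each level by slicing, replacing the middle character, and comparing against a reversed copy, B iterates a shrinking prefix length m over the original string and tests palindromicity in place by index comparisons w[i]==w[m-1-i]; the middle replacement is dropped because the middle character never affects the test or the next level.
import Mathlib
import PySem

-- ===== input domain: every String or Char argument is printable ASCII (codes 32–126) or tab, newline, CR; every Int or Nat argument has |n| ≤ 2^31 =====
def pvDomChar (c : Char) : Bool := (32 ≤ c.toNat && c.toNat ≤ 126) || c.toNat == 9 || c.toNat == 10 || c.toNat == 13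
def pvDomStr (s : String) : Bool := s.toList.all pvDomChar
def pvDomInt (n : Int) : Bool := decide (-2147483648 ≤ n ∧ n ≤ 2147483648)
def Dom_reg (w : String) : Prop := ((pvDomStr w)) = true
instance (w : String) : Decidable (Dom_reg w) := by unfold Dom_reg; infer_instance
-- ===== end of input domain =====

-- B replaces A's recursion (which rebuilds each level by slicing and middle-'A' replacement and
-- compares against a reversed copy) by a loop over a shrinking prefix LENGTH of the original
-- string, testing palindromicity in place by index comparisons (objective: alternative).

-- ===== PORT A =====
-- A's recursion, over List Char; all slices have nonnegative in-range bounds, so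
-- w[:k] = take k, w[k+1:] = drop (k+1), w[::] = l, w[::-1] = l.reverse — exact there.
-- Fuel is only a totality guard: it is never exhausted when l ≠ [] (Pre_).
def regF : Nat → List Char → Int
  | 0, _ => 0
  | f + 1, l =>
    if l.length = 1 then 1
    else
      let l' := if l.length % 2 = 1
        then l.take (l.length / 2) ++ ['A'] ++ l.drop (l.length / 2 + 1)
        else l
      if l' = l'.reverse then regF f (l'.take (l'.length / 2)) + 1 else 0

def reg (w : String) : Int := regF (w.toList.length + 1) w.toList

-- ===== PORT B =====
-- B's while loop over the prefix length m of the fixed original list L, with depth accumulator c;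
-- `all(w[i] == w[m-1-i] for i in range(m//2))` is the List.range-all; w[i] → L[i]? (every index
-- the loop probes is in range, since m ≤ L.length throughout — exact there).
-- Fuel is only a totality guard: never exhausted when L ≠ [] (Pre_).
def regAltLoop : Nat → List Char → Nat → Int → Int
  | 0, _, _, c => c
  | f + 1, L, m, c =>
    if m = 1 then c + 1
    else if (List.range (m / 2)).all (fun i => L[i]? == L[m - 1 - i]?) then
      regAltLoop f L (m / 2) (c + 1)
    else c

def reg_alt (w : String) : Int := regAltLoop (w.toList.length + 1) w.toList w.toList.length 0

-- ===== PRECONDITION & SPEC =====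
-- Pre_ excludes only the empty string, on which Python A hits RecursionError (and B loops forever).
def Pre_reg (w : String) : Prop := w ≠ ""
instance (w : String) : Decidable (Pre_reg w) := by unfold Pre_reg; infer_instance
def pvWitness_reg : String := "abba"
def Spec_reg (w : String) (out : Int) : Prop := out = reg_alt w
instance (w : String) (out : Int) : Decidable (Spec_reg w out) := by unfold Spec_reg; infer_instance

-- ===== CLAIM (what is proved, stated in full; the proofs are below) =====
def Claim_equal_reg : Prop := ∀ (w : String), Dom_reg w → Pre_reg w → Spec_reg w (reg w)

-- ===== LEMMAS AND PROOFS =====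

-- Palindromicity via getElem?: l = l.reverse iff every index agrees with its mirror.
theorem pal_iff_all (l : List Char) :
    l = l.reverse ↔ ∀ i, i < l.length → l[i]? = l[l.length - 1 - i]? := by
  constructor
  · intro h i hi
    conv_lhs => rw [h]
    rw [List.getElem?_reverse hi]
  · intro h
    apply List.ext_getElem?
    intro i
    by_cases hi : i < l.length
    · rw [List.getElem?_reverse hi]; exact h i hi
    · rw [List.getElem?_eq_none (by omega), List.getElem?_eq_none (by simp; omega)]

-- The half-range check suffices: mirrors of the first half cover everything but the middle.
theorem pal_iff_half (l : List Char) :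
    l = l.reverse ↔ ∀ i, i < l.length / 2 → l[i]? = l[l.length - 1 - i]? := by
  rw [pal_iff_all]
  constructor
  · intro h i hi; exact h i (by omega)
  · intro h i hi
    by_cases h1 : i < l.length / 2
    · exact h i h1
    · by_cases h2 : l.length - 1 - i < l.length / 2
      · have e : l.length - 1 - (l.length - 1 - i) = i := by omega
        have hh := h _ h2
        rw [e] at hh
        exact hh.symm
      · have : l.length - 1 - i = i := by omega
        rw [this]

-- getElem? of A's middle-replaced list: 'A' at the middle, unchanged elsewhere.
theorem mid_getElem? (l : List Char) (k : Nat) (hk : l.length = 2 * k + 1) (i : Nat) :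
    (l.take k ++ ['A'] ++ l.drop (k + 1))[i]? =
      if i = k then some 'A' else l[i]? := by
  rcases lt_trichotomy i k with h | h | h
  · rw [if_neg (by omega)]
    rw [List.getElem?_append_left (by simp; omega)]
    rw [List.getElem?_append_left (by simp; omega)]
    exact List.getElem?_take_of_lt h
  · rw [if_pos h]
    subst h
    rw [List.getElem?_append_left (by simp; omega)]
    rw [List.getElem?_append_right (by simp)]
    simp [List.length_take, Nat.min_eq_left (by omega : i ≤ l.length)]
  · rw [if_neg (by omega)]
    rw [List.getElem?_append_right (by simp; omega)]
    simp only [List.length_append, List.length_take, List.length_cons, List.length_nil]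
    rw [List.getElem?_drop]
    congr 1
    have : min k l.length = k := by omega
    omega

-- A's middle-replaced list is a palindrome iff the original is (the middle char is its own mirror).
theorem mid_pal_iff (l : List Char) (k : Nat) (hk : l.length = 2 * k + 1) :
    (l.take k ++ ['A'] ++ l.drop (k + 1) = (l.take k ++ ['A'] ++ l.drop (k + 1)).reverse)
      ↔ l = l.reverse := by
  have hlen : (l.take k ++ ['A'] ++ l.drop (k + 1)).length = l.length := by
    simp; omega
  rw [pal_iff_half, pal_iff_half, hlen]
  have hhalf : l.length / 2 = k := by omega
  rw [hhalf]
  constructor <;> intro h i hi <;> have := h i hi <;>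
    rw [mid_getElem? l k hk i, mid_getElem? l k hk (l.length - 1 - i)] at * <;>
    · rw [if_neg (by omega), if_neg (by omega)] at *
      exact this

-- A's recursion argument: the next level is just the half-length prefix of this level.
theorem mid_take (l : List Char) (k : Nat) (hk : l.length = 2 * k + 1) :
    ((l.take k ++ ['A'] ++ l.drop (k + 1)).take
      ((l.take k ++ ['A'] ++ l.drop (k + 1)).length / 2)) = l.take k := by
  have hlen : (l.take k ++ ['A'] ++ l.drop (k + 1)).length = l.length := by simp; omega
  rw [hlen, hk]
  have : (2 * k + 1) / 2 = k := by omega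
  rw [this]
  rw [List.take_append_of_le_length (by simp [List.length_take]; omega)]
  rw [List.take_append_of_le_length (by simp [List.length_take]; omega)]
  rw [List.take_take]
  congr 1; omega

-- B's boolean check equals palindromicity of the m-prefix (for m ≤ L.length).
theorem check_iff (L : List Char) (m : Nat) (hm : m ≤ L.length) :
    ((List.range (m / 2)).all (fun i => L[i]? == L[m - 1 - i]?) = true)
      ↔ L.take m = (L.take m).reverse := by
  rw [pal_iff_half]
  have hlen : (L.take m).length = m := by simp [hm]
  rw [hlen]
  simp only [List.all_eq_true, List.mem_range, beq_iff_eq]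
  constructor <;> intro h i hi <;> have := h i hi
  · rw [List.getElem?_take_of_lt (by omega), List.getElem?_take_of_lt (by omega)]
    exact this
  · rw [List.getElem?_take_of_lt (by omega), List.getElem?_take_of_lt (by omega)] at this
    exact this

-- Main invariant: B's loop on prefix length m computes c plus A's result on the m-prefix.
theorem loop_eq (f : Nat) : ∀ (L : List Char) (m : Nat) (c : Int),
    1 ≤ m → m ≤ L.length → regAltLoop f L m c = c + regF f (L.take m) := by
  induction f with
  | zero => intro L m c _ _; simp [regAltLoop, regF]
  | succ f ih =>
    intro L m c h1 hm
    have hlen : (L.take m).length = m := by simp [hm]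
    by_cases hm1 : m = 1
    · subst hm1
      simp [regAltLoop, regF, hlen]
    · have hm2 : 2 ≤ m := by omega
      simp only [regAltLoop, regF, hlen, if_neg hm1]
      by_cases hodd : m % 2 = 1
      · -- odd length: A replaces the middle; palindromicity and the next prefix are unchanged
        obtain ⟨k, hk⟩ : ∃ k, m = 2 * k + 1 := ⟨m / 2, by omega⟩
        have hk' : (L.take m).length = 2 * k + 1 := by rw [hlen]; omega
        simp only [if_pos hodd]
        simp only [check_iff L m hm]
        have hkm : m / 2 = k := by omega
        rw [hkm]
        simp only [mid_pal_iff (L.take m) k hk']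
        split_ifs with hp
        · rw [mid_take (L.take m) k hk']
          rw [List.take_take]
          have hmin : min k m = k := by omega
          rw [hmin, ih L k (c + 1) (by omega) (by omega)]
          ring
        · ring
      · -- even length: A keeps the string
        simp only [if_neg hodd]
        simp only [check_iff L m hm]
        split_ifs with hp
        · rw [hlen, List.take_take, Nat.min_eq_left (by omega),
            ih L (m / 2) (c + 1) (by omega) (by omega)]
          ring
        · ring

-- ===== VERDICT (by name: the statement is the Claim_ definition above) =====
theorem reg_spec : Claim_equal_reg := by
  intro w _ hpre
  unfold Spec_reg reg reg_alt
  have hne : w.toList ≠ [] := by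
    simp only [ne_eq, String.toList_eq_nil_iff]
    exact hpre
  have hpos : 0 < w.toList.length := List.length_pos_iff.mpr hne
  rw [loop_eq (w.toList.length + 1) w.toList w.toList.length 0 (by omega) le_rfl]
  rw [List.take_of_length_le le_rfl]
  simp
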